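-- pv_equiv track=rewrite | github.com/riyuzenn/hype | hype/color.py | tokenize_newline
-- ===== SOURCE A (Python) =====
-- TOKEN_DATA = 0
--
-- TOKEN_NEWLINE = 1
--
-- def tokenize_newline(data: str):
--     """
--     Given a string that does not contain any tags, this function will
--     yield a list of ``TOKEN_NEWLINE`` and ``TOKEN_DATA`` tokens in such way
--     that if you concatenate their data, you will have the original string.
--     N.B. Newline must have been normalized to ``\n`` before calling this function.
--     :param data: Input data string to be tokenize.
--     """
--     lines = data.split("\n")
--     last_line = lines.pop()
--     for line in lines:
--         if line:
--             yield TOKEN_DATA, None, None, line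
--         yield TOKEN_NEWLINE, None, None, "\n"
--
--     if last_line:
--         yield TOKEN_DATA, None, None, last_line
-- ===== SOURCE B (Python) =====
-- TOKEN_DATA = 0
--
-- TOKEN_NEWLINE = 1
--
-- def tokenize_newline(data: str):
--     """Single-pass character scanner with a running buffer (no split/pop)."""
--     buf = ""
--     for ch in data:
--         if ch == "\n":
--             if buf:
--                 yield TOKEN_DATA, None, None, buf
--             yield TOKEN_NEWLINE, None, None, "\n"
--             buf = ""
--         else:
--             buf += ch
--     if buf:
--         yield TOKEN_DATA, None, None, buf
-- ===== Notes on version B (the rewrite author's own statement) =====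
-- stated objective: alternative
-- what changed: Replaced split-into-lines plus pop and a loop over the line list with a single-pass character scanner that flushes a running buffer at each newline and at the end.
import Mathlib
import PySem

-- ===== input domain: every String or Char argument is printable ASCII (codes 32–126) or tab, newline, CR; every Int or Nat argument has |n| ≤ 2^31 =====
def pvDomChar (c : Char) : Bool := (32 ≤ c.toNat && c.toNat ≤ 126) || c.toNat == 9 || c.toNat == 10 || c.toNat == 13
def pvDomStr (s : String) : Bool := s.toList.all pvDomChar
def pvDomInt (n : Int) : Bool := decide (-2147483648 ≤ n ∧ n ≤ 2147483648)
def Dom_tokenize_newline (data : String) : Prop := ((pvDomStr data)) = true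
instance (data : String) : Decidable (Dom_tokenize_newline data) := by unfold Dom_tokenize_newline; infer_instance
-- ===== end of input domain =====

-- B replaces A's split("\n")/pop over a list of lines by a single-pass character scanner with a running buffer (alternative decomposition, same cost).


-- ===== PORT A =====
-- lines = data.split("\n"); last_line = lines.pop(); for line in lines: yield …; final flush of last_line.
-- Line strings are kept as char lists and materialized with String.ofList at yield time
-- (exact: a Python line string is truthy iff its char list is nonempty).
def tokenize_newline (data : String) : List (Int × Option String × Option String × String) :=
  let lines := PySem.Chars.splitOn data.toList ['\n']
  let last_line := lines.getLastD []
  let rest := lines.dropLast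
  (rest.foldl (fun acc line =>
      acc ++ ((if line ≠ [] then [((0 : Int), none, none, String.ofList line)] else [])
          ++ [((1 : Int), (none : Option String), (none : Option String), "\n")])) [])
  ++ (if last_line ≠ [] then [((0 : Int), none, none, String.ofList last_line)] else [])

-- ===== PORT B =====
-- single pass: running buffer of chars; on '\n' flush the buffer (if nonempty) then emit the newline token; flush at end.
def tokenizeScan (buf : List Char) : List Char → List (Int × Option String × Option String × String)
  | [] => if buf ≠ [] then [((0 : Int), none, none, String.ofList buf)] else []
  | c :: rest =>
    if c = '\n' then
      (if buf ≠ [] then [((0 : Int), none, none, String.ofList buf)] else [])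
        ++ ((1 : Int), (none : Option String), (none : Option String), "\n") :: tokenizeScan [] rest
    else
      tokenizeScan (buf ++ [c]) rest

def tokenize_newline_alt (data : String) : List (Int × Option String × Option String × String) :=
  tokenizeScan [] data.toList

-- ===== PRECONDITION & SPEC =====
def Spec_tokenize_newline (data : String) (out : List (Int × Option String × Option String × String)) : Prop := out = tokenize_newline_alt data
instance (data : String) (out : List (Int × Option String × Option String × String)) : Decidable (Spec_tokenize_newline data out) := by unfold Spec_tokenize_newline; infer_instance

-- ===== CLAIM (what is proved, stated in full; the proofs are below) =====
def Claim_equal_tokenize_newline : Prop := ∀ (data : String), Dom_tokenize_newline data → Spec_tokenize_newline data (tokenize_newline data)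

-- ===== LEMMAS AND PROOFS =====

-- simple recursive characterisation of splitting a char list at '\n'
def mySplit : List Char → List (List Char)
  | [] => [[]]
  | c :: cs =>
    if c = '\n' then [] :: mySplit cs
    else
      match mySplit cs with
      | [] => [[c]]
      | h :: t => (c :: h) :: t

theorem mySplit_ne_nil (cs : List Char) : mySplit cs ≠ [] := by
  cases cs with
  | nil => simp [mySplit]
  | cons c cs =>
    simp only [mySplit]
    split
    · simp
    · cases mySplit cs <;> simp

-- prepend a prefix onto the first piece
def prepFirst (p : List Char) : List (List Char) → List (List Char)
  | [] => [p]
  | h :: t => (p ++ h) :: t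

theorem splitOn_go_newline (l : List Char) : ∀ (fuel : Nat), l.length ≤ fuel →
    ∀ (cur : List Char) (acc : List (List Char)),
    PySem.Chars.splitOn.go ['\n'] fuel l cur acc = acc.reverse ++ prepFirst cur.reverse (mySplit l) := by
  induction l with
  | nil =>
    intro fuel _ cur acc
    cases fuel <;> simp [PySem.Chars.splitOn.go, mySplit, prepFirst]
  | cons c rest ih =>
    intro fuel hf cur acc
    cases fuel with
    | zero => simp at hf
    | succ f =>
      have hf' : rest.length ≤ f := by simpa using hf
      by_cases hc : c = '\n'
      · subst hc
        rw [show PySem.Chars.splitOn.go ['\n'] (f+1) ('\n' :: rest) cur acc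
              = PySem.Chars.splitOn.go ['\n'] f rest [] (cur.reverse :: acc) by
            simp [PySem.Chars.splitOn.go, List.isPrefixOf]]
        rw [ih f hf' [] (cur.reverse :: acc)]
        simp only [mySplit]
        cases h : mySplit rest with
        | nil => exact absurd h (mySplit_ne_nil rest)
        | cons hh tt => simp [prepFirst]
      · rw [show PySem.Chars.splitOn.go ['\n'] (f+1) (c :: rest) cur acc
              = PySem.Chars.splitOn.go ['\n'] f rest (c :: cur) acc by
            simp [PySem.Chars.splitOn.go, List.isPrefixOf, Ne.symm hc]]
        rw [ih f hf' (c :: cur) acc]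
        have := mySplit_ne_nil rest
        simp only [mySplit, if_neg hc]
        cases h : mySplit rest with
        | nil => exact absurd h this
        | cons hh tt => simp [prepFirst]

theorem splitOn_newline (cs : List Char) : PySem.Chars.splitOn cs ['\n'] = mySplit cs := by
  unfold PySem.Chars.splitOn
  rw [splitOn_go_newline cs (cs.length + 1) (by omega) [] []]
  cases h : mySplit cs with
  | nil => exact absurd h (mySplit_ne_nil cs)
  | cons hh tt => simp [prepFirst]

-- tokens produced from a nonempty list of lines
def tokLines : List (List Char) → List (Int × Option String × Option String × String)
  | [] => []
  | [l] => if l ≠ [] then [((0 : Int), none, none, String.ofList l)] else []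
  | l :: rest =>
    (if l ≠ [] then [((0 : Int), none, none, String.ofList l)] else [])
      ++ ((1 : Int), (none : Option String), (none : Option String), "\n") :: tokLines rest

-- A's foldl-plus-final-flush over a nonempty line list is tokLines
theorem tokA_eq (lines : List (List Char)) (h : lines ≠ []) :
    (lines.dropLast.flatMap (fun line =>
        (if line ≠ [] then [((0 : Int), none, none, String.ofList line)] else [])
          ++ [((1 : Int), (none : Option String), (none : Option String), "\n")]))
      ++ (if lines.getLastD [] ≠ [] then [((0 : Int), none, none, String.ofList (lines.getLastD []))] else [])
    = tokLines lines := by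
  induction lines with
  | nil => exact absurd rfl h
  | cons l rest ih =>
    cases rest with
    | nil => simp [tokLines]
    | cons h2 t2 =>
      simp only [List.dropLast_cons_of_ne_nil (by simp : h2 :: t2 ≠ ([] : List (List Char))),
        List.flatMap_cons, List.getLastD_cons]
      rw [List.append_assoc]
      rw [show tokLines (l :: h2 :: t2)
            = (if l ≠ [] then [((0 : Int), none, none, String.ofList l)] else [])
              ++ ((1 : Int), (none : Option String), (none : Option String), "\n") :: tokLines (h2 :: t2) from rfl]
      rw [← ih (by simp)]
      simp
      cases t2 with
      | nil => simp
      | cons x xs =>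
        cases hx : (x :: xs).getLast? with
        | none => simp [List.getLast?_eq_none_iff] at hx
        | some y => simp [hx]

-- B's scanner over cs with buffer buf is tokLines of mySplit with buf prepended to the first piece
theorem tokB_eq (cs : List Char) : ∀ (buf : List Char),
    tokenizeScan buf cs = tokLines (prepFirst buf (mySplit cs)) := by
  induction cs with
  | nil => intro buf; simp [tokenizeScan, mySplit, prepFirst, tokLines]
  | cons c rest ih =>
    intro buf
    by_cases hc : c = '\n'
    · subst hc
      rw [show tokenizeScan buf ('\n' :: rest)
            = (if buf ≠ [] then [((0 : Int), none, none, String.ofList buf)] else [])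
              ++ ((1 : Int), (none : Option String), (none : Option String), "\n") :: tokenizeScan [] rest from rfl]
      rw [ih []]
      simp only [mySplit, prepFirst]
      cases h : mySplit rest with
      | nil => exact absurd h (mySplit_ne_nil rest)
      | cons hh tt => simp [tokLines]
    · rw [show tokenizeScan buf (c :: rest) = tokenizeScan (buf ++ [c]) rest by
        simp [tokenizeScan, hc]]
      rw [ih (buf ++ [c])]
      simp only [mySplit, if_neg hc]
      cases h : mySplit rest with
      | nil => exact absurd h (mySplit_ne_nil rest)
      | cons hh tt => simp [prepFirst]

-- ===== VERDICT (by name: the statement is the Claim_ definition above) =====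
theorem tokenize_newline_spec : Claim_equal_tokenize_newline := by
  intro data _
  unfold Spec_tokenize_newline tokenize_newline tokenize_newline_alt
  simp only [splitOn_newline, PySem.List.foldl_append_eq_flatMap, List.nil_append, tokB_eq]
  have h : prepFirst [] (mySplit data.toList) = mySplit data.toList := by
    cases h : mySplit data.toList with
    | nil => exact absurd h (mySplit_ne_nil _)
    | cons hh tt => simp [prepFirst]
  rw [h, tokA_eq _ (mySplit_ne_nil _)]
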